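-- pv_equiv track=rewrite | github.com/Emmanuelcsam/WhatNow- | services/ai_relation_detector.py | _detect_personality_traits
-- ===== SOURCE A (Python) =====
-- from typing import List, Dict, Any, Set, Tuple
--
-- def _detect_personality_traits(text: str) -> Set[str]:
--     """Detect personality traits from text"""
--     traits = set()
--
--     trait_keywords = {
--         'outgoing': ['social', 'friends', 'party', 'gathering', 'meetup'],
--         'creative': ['create', 'design', 'art', 'music', 'write'],
--         'active': ['run', 'exercise', 'sport', 'gym', 'fitness'],
--         'intellectual': ['read', 'study', 'research', 'learn', 'book'],
--         'adventurous': ['travel', 'explore', 'adventure', 'new'],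
--         'family-oriented': ['family', 'kids', 'children', 'parent'],
--         'professional': ['work', 'career', 'business', 'professional'],
--         'social': ['friends', 'social', 'community', 'group'],
--         'nature-lover': ['nature', 'outdoor', 'hiking', 'camping'],
--         'tech-savvy': ['technology', 'computer', 'programming', 'tech']
--     }
--
--     for trait, keywords in trait_keywords.items():
--         if any(keyword in text for keyword in keywords):
--             traits.add(trait)
--
--     return traits
-- ===== SOURCE B (Python) =====
-- # Inverted index: each keyword mapped (once) to the traits it evidences,
-- # precomputed at module load; detection scans keywords, not traits.
-- _KEYWORD_TRAITS = {
--     'social': ('outgoing', 'social'),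
--     'friends': ('outgoing', 'social'),
--     'party': ('outgoing',),
--     'gathering': ('outgoing',),
--     'meetup': ('outgoing',),
--     'create': ('creative',),
--     'design': ('creative',),
--     'art': ('creative',),
--     'music': ('creative',),
--     'write': ('creative',),
--     'run': ('active',),
--     'exercise': ('active',),
--     'sport': ('active',),
--     'gym': ('active',),
--     'fitness': ('active',),
--     'read': ('intellectual',),
--     'study': ('intellectual',),
--     'research': ('intellectual',),
--     'learn': ('intellectual',),
--     'book': ('intellectual',),
--     'travel': ('adventurous',),
--     'explore': ('adventurous',),
--     'adventure': ('adventurous',),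
--     'new': ('adventurous',),
--     'family': ('family-oriented',),
--     'kids': ('family-oriented',),
--     'children': ('family-oriented',),
--     'parent': ('family-oriented',),
--     'work': ('professional',),
--     'career': ('professional',),
--     'business': ('professional',),
--     'professional': ('professional',),
--     'community': ('social',),
--     'group': ('social',),
--     'nature': ('nature-lover',),
--     'outdoor': ('nature-lover',),
--     'hiking': ('nature-lover',),
--     'camping': ('nature-lover',),
--     'technology': ('tech-savvy',),
--     'computer': ('tech-savvy',),
--     'programming': ('tech-savvy',),
--     'tech': ('tech-savvy',),
-- }
--
-- _TRAIT_ORDER = ('outgoing', 'creative', 'active', 'intellectual', 'adventurous',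
--                 'family-oriented', 'professional', 'social', 'nature-lover', 'tech-savvy')
--
--
-- def _detect_personality_traits(text: str):
--     """Detect personality traits from text"""
--     hit = set()
--     for keyword, traits in _KEYWORD_TRAITS.items():
--         if keyword in text:
--             hit.update(traits)
--     # return in canonical trait order (a set, so order is only cosmetic)
--     return {t for t in _TRAIT_ORDER if t in hit}
-- ===== Notes on version B (the rewrite author's own statement) =====
-- stated objective: alternative
-- what changed: B uses a precomputed inverted index mapping each keyword to the traits it evidences, scans the keywords once unioning the hit traits into a set, and finally lists the hit traits in canonical order, instead of A's per-trait loop running any() substring tests over that trait's keyword list.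
import Mathlib
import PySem

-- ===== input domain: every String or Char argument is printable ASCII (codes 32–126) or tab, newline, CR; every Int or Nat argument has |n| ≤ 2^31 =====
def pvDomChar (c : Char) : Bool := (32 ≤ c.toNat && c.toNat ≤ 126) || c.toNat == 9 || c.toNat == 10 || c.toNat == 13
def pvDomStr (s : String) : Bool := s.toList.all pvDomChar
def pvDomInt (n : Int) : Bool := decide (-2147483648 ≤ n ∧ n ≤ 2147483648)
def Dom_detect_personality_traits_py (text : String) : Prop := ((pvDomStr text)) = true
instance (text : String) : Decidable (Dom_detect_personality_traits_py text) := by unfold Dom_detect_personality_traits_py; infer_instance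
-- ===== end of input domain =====

-- B replaces A's per-trait any() scan by a precomputed inverted keyword→traits index scanned once over the keywords; alternative decomposition, same result set.


-- ===== PORT A =====
-- A's literal trait_keywords dict (insertion order)
def pvTraitKeywords : List (String × List String) :=
  [("outgoing", ["social", "friends", "party", "gathering", "meetup"]),
   ("creative", ["create", "design", "art", "music", "write"]),
   ("active", ["run", "exercise", "sport", "gym", "fitness"]),
   ("intellectual", ["read", "study", "research", "learn", "book"]),
   ("adventurous", ["travel", "explore", "adventure", "new"]),
   ("family-oriented", ["family", "kids", "children", "parent"]),
   ("professional", ["work", "career", "business", "professional"]),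
   ("social", ["friends", "social", "community", "group"]),
   ("nature-lover", ["nature", "outdoor", "hiking", "camping"]),
   ("tech-savvy", ["technology", "computer", "programming", "tech"])]

def detect_personality_traits_py (text : String) : List String :=
  pvTraitKeywords.foldl
    (fun traits p =>
      if p.2.any (fun k => PySem.Str.isIn k text) then PySem.Set.add traits p.1 else traits)
    PySem.Set.empty

-- ===== PORT B =====
-- B's module-level inverted index _KEYWORD_TRAITS (keyword → traits it evidences)
def pvKeywordTraits : List (String × List String) :=
  [("social", ["outgoing", "social"]), ("friends", ["outgoing", "social"]),
   ("party", ["outgoing"]), ("gathering", ["outgoing"]), ("meetup", ["outgoing"]),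
   ("create", ["creative"]), ("design", ["creative"]), ("art", ["creative"]),
   ("music", ["creative"]), ("write", ["creative"]),
   ("run", ["active"]), ("exercise", ["active"]), ("sport", ["active"]),
   ("gym", ["active"]), ("fitness", ["active"]),
   ("read", ["intellectual"]), ("study", ["intellectual"]), ("research", ["intellectual"]),
   ("learn", ["intellectual"]), ("book", ["intellectual"]),
   ("travel", ["adventurous"]), ("explore", ["adventurous"]), ("adventure", ["adventurous"]),
   ("new", ["adventurous"]),
   ("family", ["family-oriented"]), ("kids", ["family-oriented"]),
   ("children", ["family-oriented"]), ("parent", ["family-oriented"]),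
   ("work", ["professional"]), ("career", ["professional"]), ("business", ["professional"]),
   ("professional", ["professional"]),
   ("community", ["social"]), ("group", ["social"]),
   ("nature", ["nature-lover"]), ("outdoor", ["nature-lover"]), ("hiking", ["nature-lover"]),
   ("camping", ["nature-lover"]),
   ("technology", ["tech-savvy"]), ("computer", ["tech-savvy"]),
   ("programming", ["tech-savvy"]), ("tech", ["tech-savvy"])]

-- B's module-level _TRAIT_ORDER tuple
def pvTraitOrder : List String :=
  ["outgoing", "creative", "active", "intellectual", "adventurous",
   "family-oriented", "professional", "social", "nature-lover", "tech-savvy"]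

-- hit = the set of traits evidenced by some keyword occurring in text (Source B's loop)
def pvHit (text : String) : PySem.Set String :=
  pvKeywordTraits.foldl
    (fun hit p => if PySem.Str.isIn p.1 text then PySem.Set.update hit p.2 else hit)
    PySem.Set.empty

def detect_personality_traits_py_alt (text : String) : List String :=
  PySem.Set.ofList (pvTraitOrder.filter (fun t => PySem.Set.contains (pvHit text) t))

-- ===== PRECONDITION & SPEC =====
def Spec_detect_personality_traits_py (text : String) (out : List String) : Prop := out = detect_personality_traits_py_alt text
instance (text : String) (out : List String) : Decidable (Spec_detect_personality_traits_py text out) := by unfold Spec_detect_personality_traits_py; infer_instance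

-- ===== CLAIM (what is proved, stated in full; the proofs are below) =====
def Claim_equal_detect_personality_traits_py : Prop := ∀ (text : String), Dom_detect_personality_traits_py text → Spec_detect_personality_traits_py text (detect_personality_traits_py text)

-- ===== LEMMAS AND PROOFS =====

-- membership in B's hit-accumulating fold
theorem mem_hitFold (c : String → Bool) (l : List (String × List String)) (s0 : PySem.Set String) (y : String) :
    y ∈ l.foldl (fun s p => if c p.1 then PySem.Set.update s p.2 else s) s0 ↔
      y ∈ s0 ∨ ∃ p ∈ l, c p.1 = true ∧ y ∈ p.2 := by
  induction l generalizing s0 with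
  | nil => simp
  | cons p t ih =>
    rcases hc : c p.1 with _ | _ <;>
      simp only [List.foldl_cons, hc, if_true, Bool.false_eq_true, if_false, ih,
        PySem.Set.mem_update]
    · constructor
      · rintro (h | ⟨q, hq, hcq, h⟩)
        · exact Or.inl h
        · exact Or.inr ⟨q, by simp [hq], hcq, h⟩
      · rintro (h | ⟨q, hq, hcq, h⟩)
        · exact Or.inl h
        · rcases List.mem_cons.mp hq with rfl | hq
          · rw [hc] at hcq; exact absurd hcq Bool.false_ne_true
          · exact Or.inr ⟨q, hq, hcq, h⟩
    · constructor
      · rintro ((h | h) | ⟨q, hq, hcq, h⟩)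
        · exact Or.inl h
        · exact Or.inr ⟨p, by simp, hc, h⟩
        · exact Or.inr ⟨q, by simp [hq], hcq, h⟩
      · rintro (h | ⟨q, hq, hcq, h⟩)
        · exact Or.inl (Or.inl h)
        · rcases List.mem_cons.mp hq with rfl | hq
          · exact Or.inl (Or.inr h)
          · exact Or.inr ⟨q, hq, hcq, h⟩

-- A's fold over a nodup-keyed list is a filter followed by projection
theorem foldl_addIf_eq_filter (c : String × List String → Bool)
    (l : List (String × List String)) (acc : PySem.Set String)
    (hnd : (acc ++ l.map Prod.fst).Nodup) :
    l.foldl (fun s p => if c p then PySem.Set.add s p.1 else s) acc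
      = acc ++ (l.filter c).map Prod.fst := by
  induction l generalizing acc with
  | nil => simp
  | cons p t ih =>
    simp only [List.map_cons] at hnd
    have hmid := List.nodup_middle.mp hnd
    have hnotin : p.1 ∉ acc := fun h => (List.nodup_cons.mp hmid).1 (List.mem_append.mpr (Or.inl h))
    rcases hc : c p with _ | _
    · simp only [List.foldl_cons, List.filter_cons, hc, Bool.false_eq_true, if_false]
      exact ih acc (by
        have := (List.nodup_cons.mp hmid).2
        simpa using this)
    · simp only [List.foldl_cons, hc, if_true, List.filter_cons_of_pos hc, List.map_cons]
      rw [PySem.Set.add_of_not_mem hnotin,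
        ih (acc ++ [p.1]) (by simpa [List.append_assoc] using hnd)]
      simp

-- the inverted index is sound: a keyword entry listing trait t is one of t's keywords
set_option maxHeartbeats 2000000 in
theorem index_sound : ∀ p ∈ pvKeywordTraits, ∀ q ∈ pvTraitKeywords, q.1 ∈ p.2 → p.1 ∈ q.2 := by
  decide

-- the inverted index is complete: every keyword of a trait has an index entry listing that trait
set_option maxHeartbeats 2000000 in
theorem index_complete : ∀ q ∈ pvTraitKeywords, ∀ k ∈ q.2, ∃ p ∈ pvKeywordTraits, p.1 = k ∧ q.1 ∈ p.2 := by
  decide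

theorem traitOrder_eq : pvTraitOrder = pvTraitKeywords.map Prod.fst := by decide

theorem traitKeys_nodup : (pvTraitKeywords.map Prod.fst).Nodup := by decide

-- per-trait: B's hit-set membership test equals A's any() over that trait's keywords
theorem cond_eq (text : String) (q : String × List String) (hq : q ∈ pvTraitKeywords) :
    PySem.Set.contains (pvHit text) q.1 = q.2.any (fun k => PySem.Str.isIn k text) := by
  have hmem : ∀ y : String, y ∈ pvHit text ↔ ∃ p ∈ pvKeywordTraits, PySem.Str.isIn p.1 text = true ∧ y ∈ p.2 := by
    intro y
    rw [pvHit,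
      mem_hitFold (fun k => PySem.Str.isIn k text) pvKeywordTraits PySem.Set.empty y]
    simp [PySem.Set.empty]
  rcases hany : q.2.any (fun k => PySem.Str.isIn k text) with _ | _
  · rw [Bool.eq_false_iff]
    intro hcon
    rcases (hmem q.1).mp ((PySem.Set.contains_iff (pvHit text) q.1).mp hcon) with ⟨p, hp, hcp, hin⟩
    have hk : p.1 ∈ q.2 := index_sound p hp q hq hin
    have : q.2.any (fun k => PySem.Str.isIn k text) = true := List.any_eq_true.mpr ⟨p.1, hk, hcp⟩
    rw [hany] at this; exact Bool.false_ne_true this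
  · rcases List.any_eq_true.mp hany with ⟨k, hk, hck⟩
    rcases index_complete q hq k hk with ⟨p, hp, hpk, hqt⟩
    exact (PySem.Set.contains_iff (pvHit text) q.1).mpr ((hmem q.1).mpr
      ⟨p, hp, by rw [hpk]; exact hck, hqt⟩)

-- ===== VERDICT (by name: the statement is the Claim_ definition above) =====
theorem detect_personality_traits_py_spec : Claim_equal_detect_personality_traits_py := by
  intro text _
  unfold Spec_detect_personality_traits_py detect_personality_traits_py detect_personality_traits_py_alt
  rw [foldl_addIf_eq_filter _ _ _ (by simpa [PySem.Set.empty] using traitKeys_nodup),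
    traitOrder_eq, List.filter_map]
  simp only [Function.comp_def]
  rw [List.filter_congr (fun q hq => (cond_eq text q hq : _))]
  have hnd2 : (List.map Prod.fst
      (List.filter (fun q => q.2.any fun k => PySem.Str.isIn k text) pvTraitKeywords)).Nodup :=
    traitKeys_nodup.sublist (List.filter_sublist.map Prod.fst)
  rw [PySem.Set.ofList_eq_self_of_nodup _ hnd2]
  simp [PySem.Set.empty]
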